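-- pv_equiv track=rewrite | github.com/mabhijithn/irregulars-neureka-codebase | library/spir.py | merge_events
-- ===== SOURCE A (Python) =====
-- def merge_events(events, distance):
--     i = 1
--     tot_len = len(events)
--     while i < tot_len:
--         if events[i][0] - events[i-1][1] < distance:
--             events[i-1][1] = events[i][1]
--             events.pop(i)
--             tot_len -= 1
--         else:
--             i += 1
--     return events
-- ===== SOURCE B (Python) =====
-- def merge_events(events, distance):
--     # One forward pass: keep a growing output list, merging each event
--     # into the last kept one when the gap is small.  (A mutates `events`
--     # in place; B leaves its input untouched and builds a new list.)
--     out = []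
--     for ev in events:
--         if out and ev[0] - out[-1][1] < distance:
--             last = out[-1]
--             out[-1] = last[:1] + [ev[1]] + last[2:]
--         else:
--             out.append(ev)
--     return out
-- ===== Notes on version B (the rewrite author's own statement) =====
-- stated objective: alternative
-- what changed: Replaced A's while-loop that repeatedly mutates and pops from the input list by a single forward pass that appends to / patches the last element of a fresh output list; B also leaves the input list unmutated (A mutates it in place; the equivalence is about the return value).
-- outside the precondition, e.g. on merge_events([[0, 5], [100]], 3): A returns [[0, 5], [100]], B returns [[0, 5], [100]]
import Mathlib
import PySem

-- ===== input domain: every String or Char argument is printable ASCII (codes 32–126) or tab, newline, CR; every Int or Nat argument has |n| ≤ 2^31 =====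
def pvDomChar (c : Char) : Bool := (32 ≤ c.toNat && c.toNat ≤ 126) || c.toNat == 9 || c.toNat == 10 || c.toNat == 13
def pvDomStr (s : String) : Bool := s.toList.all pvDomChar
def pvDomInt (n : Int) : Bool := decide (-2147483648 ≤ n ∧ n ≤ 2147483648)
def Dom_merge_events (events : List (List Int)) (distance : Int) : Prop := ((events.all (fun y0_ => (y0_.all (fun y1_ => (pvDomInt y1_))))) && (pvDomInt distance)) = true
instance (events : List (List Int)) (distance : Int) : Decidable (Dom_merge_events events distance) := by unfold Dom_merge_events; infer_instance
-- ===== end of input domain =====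

-- B replaces A's pop-in-place while-loop by one forward pass building a new
-- output list (A mutates its argument in place; the equivalence proved here is about the
-- return value only — B leaves its input unmutated).

-- ===== PORT A =====
-- A's while-loop: `i` is the cursor; `tot_len` always equals the current list length, so it
-- is not carried separately; `fuel` is a totality guard only: the quantity tot_len - i drops by one
-- each iteration, so fuel = events.length is never exhausted.  Indices here are nonnegative and in range on admitted inputs,
-- so List.getD/List.set are exact for Python's events[i][j] reads and events[i-1][1] = …;
-- events.pop(i) is eraseIdx i.
def merge_events_go (distance : Int) : Nat → Nat → List (List Int) → List (List Int)
  | 0, _, events => events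
  | fuel + 1, i, events =>
    if i < events.length then
      if ((events.getD i []).getD 0 0) - ((events.getD (i-1) []).getD 1 0) < distance then
        merge_events_go distance fuel i
          ((events.set (i-1) ((events.getD (i-1) []).set 1 ((events.getD i []).getD 1 0))).eraseIdx i)
      else
        merge_events_go distance fuel (i+1) events
    else events

def merge_events (events : List (List Int)) (distance : Int) : List (List Int) :=
  merge_events_go distance events.length 1 events

-- ===== PORT B =====
-- Source B's loop body: `if out and …` is the getLast? match; out[-1] = last[:1] + [ev[1]] + last[2:]
-- is take 1 ++ [ev[1]] ++ drop 2 placed at the last position.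
def merge_step (distance : Int) (out : List (List Int)) (ev : List Int) : List (List Int) :=
  match out.getLast? with
  | some last =>
    if ev.getD 0 0 - last.getD 1 0 < distance then
      out.dropLast ++ [last.take 1 ++ [ev.getD 1 0] ++ last.drop 2]
    else out ++ [ev]
  | none => out ++ [ev]

def merge_events_alt (events : List (List Int)) (distance : Int) : List (List Int) :=
  events.foldl (merge_step distance) []

-- ===== PRECONDITION & SPEC =====
-- Pre_ excludes event lists of length ≥ 2 containing a sub-event with fewer than 2 entries:
-- on those A's events[i][0]/events[i-1][1] accesses can raise IndexError (on some of them the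
-- short sub-event is never reached and A still returns — see the cite in claim.json).
def Pre_merge_events (events : List (List Int)) (distance : Int) : Prop :=
  events.length ≤ 1 ∨ ∀ ev ∈ events, 2 ≤ ev.length
instance (events : List (List Int)) (distance : Int) : Decidable (Pre_merge_events events distance) := by
  unfold Pre_merge_events; infer_instance

def pvWitness_merge_events : List (List Int) × Int := ([[0, 2], [3, 10], [20, 25]], 5)

def Spec_merge_events (events : List (List Int)) (distance : Int) (out : List (List Int)) : Prop := out = merge_events_alt events distance
instance (events : List (List Int)) (distance : Int) (out : List (List Int)) : Decidable (Spec_merge_events events distance out) := by unfold Spec_merge_events; infer_instance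

-- ===== CLAIM (what is proved, stated in full; the proofs are below) =====
def Claim_equal_merge_events : Prop := ∀ (events : List (List Int)) (distance : Int), Dom_merge_events events distance → Pre_merge_events events distance → Spec_merge_events events distance (merge_events events distance)

-- ===== LEMMAS AND PROOFS =====

theorem getD_append_lt {α : Type} (l1 l2 : List α) (i : Nat) (h : i < l1.length) (d : α) :
    (l1 ++ l2).getD i d = l1.getD i d := by
  simp [List.getD, List.getElem?_append_left h]

theorem getD_append_len {α : Type} (l1 l2 : List α) (e : α) (d : α) :
    (l1 ++ e :: l2).getD l1.length d = e := by
  simp [List.getD]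

theorem getD_last {α : Type} (l : List α) (h : l ≠ []) (d : α) :
    l.getD (l.length - 1) d = l.getLast h := by
  simp [List.getD, List.getLast?_eq_getElem?.symm, List.getLast?_eq_some_getLast h]

theorem set_last {α : Type} (l : List α) (h : l ≠ []) (a : α) :
    l.set (l.length - 1) a = l.dropLast ++ [a] := by
  cases l with
  | nil => exact absurd rfl h
  | cons x t =>
    rw [List.set_eq_take_append_cons_drop, List.dropLast_eq_take]
    simp

theorem set_append_lt {α : Type} (l1 l2 : List α) (n : Nat) (a : α) (h : n < l1.length) :
    (l1 ++ l2).set n a = l1.set n a ++ l2 := by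
  rw [List.set_append]
  simp only [if_pos h]

theorem eraseIdx_append_len {α : Type} (l1 l2 : List α) :
    (l1 ++ l2).eraseIdx l1.length = l1 ++ l2.eraseIdx 0 := by
  induction l1 with
  | nil => simp
  | cons a t ih => simp [ih]

theorem set_one_eq_patch (l : List Int) (v : Int) (h : 2 ≤ l.length) :
    l.set 1 v = l.take 1 ++ [v] ++ l.drop 2 := by
  rw [List.set_eq_take_append_cons_drop]
  simp
  omega

-- loop/fold correspondence: A's loop state (events = out ++ rest, i = out.length)
-- matches B's fold of `rest` starting from accumulator `out`.
theorem go_eq_foldl (distance : Int) (rest : List (List Int)) :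
    ∀ (out : List (List Int)) (fuel : Nat), rest.length ≤ fuel → out ≠ [] →
      (∀ l ∈ out ++ rest, 2 ≤ l.length) →
      merge_events_go distance fuel out.length (out ++ rest) = rest.foldl (merge_step distance) out := by
  induction rest with
  | nil =>
    intro out fuel _ hne _
    cases fuel with
    | zero => simp [merge_events_go]
    | succ f => simp [merge_events_go]
  | cons ev rest' ih =>
    intro out fuel hfuel hne hlen
    obtain ⟨f, rfl⟩ : ∃ f, fuel = f + 1 := ⟨fuel - 1, by simp at hfuel; omega⟩
    have hf' : rest'.length ≤ f := by simp at hfuel; omega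
    have hlt : out.length < (out ++ ev :: rest').length := by simp
    have hout : 0 < out.length := List.length_pos_iff.mpr hne
    have hcur : (out ++ ev :: rest').getD out.length ([] : List Int) = ev :=
      getD_append_len out rest' ev []
    have hprev : (out ++ ev :: rest').getD (out.length - 1) ([] : List Int) = out.getLast hne := by
      rw [getD_append_lt _ _ _ (by omega), getD_last out hne]
    have hlast2 : 2 ≤ (out.getLast hne).length :=
      hlen _ (List.mem_append_left _ (List.getLast_mem hne))
    have hlastq : out.getLast? = some (out.getLast hne) := List.getLast?_eq_some_getLast hne
    rw [merge_events_go, if_pos hlt, hcur, hprev]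
    by_cases hc : ev.getD 0 0 - (out.getLast hne).getD 1 0 < distance
    · rw [if_pos hc]
      -- the merge branch
      set p' : List Int := (out.getLast hne).set 1 (ev.getD 1 0) with hp'
      have hset : (out ++ ev :: rest').set (out.length - 1) p'
          = out.set (out.length - 1) p' ++ ev :: rest' :=
        set_append_lt _ _ _ _ (by omega)
      have herase : (out.set (out.length - 1) p' ++ ev :: rest').eraseIdx out.length
          = out.set (out.length - 1) p' ++ rest' := by
        have := eraseIdx_append_len (out.set (out.length - 1) p') (ev :: rest')
        simpa using this
      set out' : List (List Int) := out.set (out.length - 1) p' with hout'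
      have hlen' : out'.length = out.length := by simp [hout']
      have hne' : out' ≠ [] := by
        intro h0
        have : out'.length = 0 := by rw [h0]; rfl
        omega
      have hstep : out' = out.dropLast ++ [(out.getLast hne).take 1 ++ [ev.getD 1 0] ++ (out.getLast hne).drop 2] := by
        rw [hout', hp', set_one_eq_patch _ _ hlast2, set_last out hne]
      have hmem' : ∀ l ∈ out' ++ rest', 2 ≤ l.length := by
        intro l hl
        rcases List.mem_append.mp hl with hl | hl
        · rcases List.mem_or_eq_of_mem_set hl with hl | hl
          · exact hlen _ (List.mem_append_left _ hl)
          · subst hl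
            rw [hp', List.length_set]
            exact hlast2
        · exact hlen _ (List.mem_append_right _ (List.mem_cons_of_mem _ hl))
      rw [hset, herase, ← hlen', ih out' f hf' hne' hmem']
      have : merge_step distance out ev = out' := by
        rw [merge_step, hlastq]
        simp only [if_pos hc]
        exact hstep.symm
      rw [List.foldl_cons, this]
    · rw [if_neg hc]
      have hre : out ++ ev :: rest' = (out ++ [ev]) ++ rest' := by simp
      have hlen2 : out.length + 1 = (out ++ [ev]).length := by simp
      have hmem' : ∀ l ∈ (out ++ [ev]) ++ rest', 2 ≤ l.length := by
        intro l hl; apply hlen; simpa using hl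
      rw [hre, hlen2, ih (out ++ [ev]) f hf' (by simp) hmem']
      have : merge_step distance out ev = out ++ [ev] := by
        rw [merge_step, hlastq]
        simp only [if_neg hc]
      rw [List.foldl_cons, this]

-- ===== VERDICT (by name: the statement is the Claim_ definition above) =====
theorem merge_events_spec : Claim_equal_merge_events := by
  intro events distance _ hpre
  unfold Spec_merge_events
  rcases hpre with hle | hall
  · -- at most one event: both sides return the input unchanged
    match events, hle with
    | [], _ => simp [merge_events, merge_events_go, merge_events_alt]
    | [e], _ => simp [merge_events, merge_events_go, merge_events_alt, merge_step]
  · cases events with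
    | nil => simp [merge_events, merge_events_go, merge_events_alt]
    | cons e rest =>
      have h1 : merge_events (e :: rest) distance
          = merge_events_go distance (rest.length + 1) ([e] : List (List Int)).length ([e] ++ rest) := by
        rw [merge_events]; rfl
      have hmem : ∀ l ∈ ([e] : List (List Int)) ++ rest, 2 ≤ l.length := by
        intro l hl; apply hall; simpa using hl
      rw [h1, go_eq_foldl distance rest [e] (rest.length + 1) (by omega) (by simp) hmem]
      rw [merge_events_alt, List.foldl_cons]
      have : merge_step distance [] e = [e] := by rw [merge_step]; rfl
      rw [this]
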